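-- pv_equiv track=rewrite | github.com/omatheu/enter-ai | backend/app/services/extraction.py | _resolve_metadata_source
-- ===== SOURCE A (Python) =====
-- from typing import Any, Dict, Iterable, Optional
--
-- def _resolve_metadata_source(field_sources: Dict[str, str]) -> str:
--     sources = {source for source in field_sources.values() if source != "not_found"}
--     if not sources:
--         return "unknown"
--     if sources == {"heuristic"}:
--         return "heuristic"
--     if sources == {"llm"}:
--         return "llm"
--     if sources == {"template"}:
--         return "template"
--     return "mixed"
-- ===== SOURCE B (Python) =====
-- def _resolve_metadata_source(field_sources):
--     first = None
--     multiple = False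
--     for source in field_sources.values():
--         if source == "not_found":
--             continue
--         if first is None:
--             first = source
--         elif source != first:
--             multiple = True
--     if first is None:
--         return "unknown"
--     if multiple or first not in ("heuristic", "llm", "template"):
--         return "mixed"
--     return first
-- ===== Notes on version B (the rewrite author's own statement) =====
-- stated objective: alternative
-- what changed: Replaces building a set of sources and comparing it against singleton sets with a single-pass accumulator that tracks the first real source and a 'multiple distinct sources' flag.
import Mathlib
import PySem

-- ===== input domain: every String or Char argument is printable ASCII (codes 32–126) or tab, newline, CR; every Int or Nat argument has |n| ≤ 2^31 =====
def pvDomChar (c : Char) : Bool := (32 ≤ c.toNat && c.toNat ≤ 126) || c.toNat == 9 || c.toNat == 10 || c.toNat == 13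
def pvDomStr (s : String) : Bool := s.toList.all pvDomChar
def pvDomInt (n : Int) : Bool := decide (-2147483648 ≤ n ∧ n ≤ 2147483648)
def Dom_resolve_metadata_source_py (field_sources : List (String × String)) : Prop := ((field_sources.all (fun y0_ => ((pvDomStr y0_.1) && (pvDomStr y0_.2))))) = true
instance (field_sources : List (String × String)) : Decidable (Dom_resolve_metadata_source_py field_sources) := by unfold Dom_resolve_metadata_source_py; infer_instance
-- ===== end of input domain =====

-- B changes the decomposition only (set-comprehension + set comparisons → one-pass accumulator); same O(n) cost, same return value.

-- ===== PORT A =====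
-- sources = {source for source in field_sources.values() if source != "not_found"}
def resolve_metadata_source_py (field_sources : List (String × String)) : String :=
  let sources : PySem.Set String :=
    PySem.Set.ofList (((PySem.Dict.ofList field_sources).values).filter (fun source => source ≠ "not_found"))
  if sources = [] then "unknown"
  else if PySem.Set.equal sources (PySem.Set.ofList ["heuristic"]) then "heuristic"
  else if PySem.Set.equal sources (PySem.Set.ofList ["llm"]) then "llm"
  else if PySem.Set.equal sources (PySem.Set.ofList ["template"]) then "template"
  else "mixed"

-- ===== PORT B =====
-- the loop body of Source B: state = (first, multiple)
def pvStepB (st : Option String × Bool) (source : String) : Option String × Bool :=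
  if source = "not_found" then st
  else match st.1 with
    | none => (some source, st.2)
    | some f => (st.1, if source ≠ f then true else st.2)

def resolve_metadata_source_py_alt (field_sources : List (String × String)) : String :=
  let st := ((PySem.Dict.ofList field_sources).values).foldl pvStepB (none, false)
  match st.1 with
  | none => "unknown"
  | some f =>
      if st.2 || !(f = "heuristic" ∨ f = "llm" ∨ f = "template" : Bool) then "mixed" else f

-- ===== PRECONDITION & SPEC =====
def Spec_resolve_metadata_source_py (field_sources : List (String × String)) (out : String) : Prop := out = resolve_metadata_source_py_alt field_sources
instance (field_sources : List (String × String)) (out : String) : Decidable (Spec_resolve_metadata_source_py field_sources out) := by unfold Spec_resolve_metadata_source_py; infer_instance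

-- ===== CLAIM (what is proved, stated in full; the proofs are below) =====
def Claim_equal_resolve_metadata_source_py : Prop := ∀ (field_sources : List (String × String)), Dom_resolve_metadata_source_py field_sources → Spec_resolve_metadata_source_py field_sources (resolve_metadata_source_py field_sources)

-- ===== LEMMAS AND PROOFS =====

-- folding pvStepB over l equals folding its non-skip part over the filtered list
lemma foldB_filter (l : List String) (st : Option String × Bool) :
    l.foldl pvStepB st = (l.filter (fun s => s ≠ "not_found")).foldl pvStepB st := by
  induction l generalizing st with
  | nil => rfl
  | cons a as ih =>
      by_cases h : a = "not_found"
      · simp [h, pvStepB, ih]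
      · simp [h, List.foldl_cons, ih]

lemma foldB_from_some (l : List String) (f : String) (b : Bool) :
    l.foldl pvStepB (some f, b) = (some f, b || l.any (fun s => s ≠ "not_found" && s ≠ f)) := by
  induction l generalizing b with
  | nil => simp
  | cons a as ih =>
      by_cases h : a = "not_found"
      · simp [h, pvStepB, ih]
      · by_cases hf : a = f
        · simp [pvStepB, hf, ih]
        · simp [pvStepB, h, hf, ih]

lemma ofList_all_eq (x : String) (xs : List String) (h : ∀ y ∈ xs, y = x) :
    PySem.Set.ofList (x :: xs) = [x] := by
  induction xs with
  | nil => rfl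
  | cons a as ih =>
      have ha : a = x := h a (by simp)
      have := ih (fun y hy => h y (by simp [hy]))
      rw [PySem.Set.ofList_cons] at this ⊢
      simp [PySem.Set.ofList_cons, ha] at this ⊢
      rw [this]
      simp [PySem.Set.discard]

lemma set_equal_singleton (x c : String) : PySem.Set.equal [x] [c] = (x == c) := by
  by_cases h : x = c
  · subst h; simp [PySem.Set.equal_iff]
  · have : ¬ (PySem.Set.equal [x] [c] = true) := by
      rw [PySem.Set.equal_iff]
      intro hall
      have hx := (hall x).mp (by simp)
      simp at hx
      exact h hx
    simp only [Bool.not_eq_true] at this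
    simp [this, beq_eq_false_iff_ne.mpr h]

lemma set_equal_false_of_two (s : PySem.Set String) (x y c : String)
    (hx : x ∈ s) (hy : y ∈ s) (hxy : x ≠ y) : PySem.Set.equal s [c] = false := by
  by_contra h
  simp only [Bool.not_eq_false] at h
  rw [PySem.Set.equal_iff] at h
  have h1 := (h x).mp hx
  have h2 := (h y).mp hy
  simp at h1 h2
  exact hxy (h1.trans h2.symm)

-- core: A and B agree as functions of the (already filtered) values list
lemma core' (vs : List String) (hvs : ∀ s ∈ vs, s ≠ "not_found") :
    (let sources := PySem.Set.ofList vs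
     if sources = [] then "unknown"
     else if PySem.Set.equal sources (PySem.Set.ofList ["heuristic"]) then "heuristic"
     else if PySem.Set.equal sources (PySem.Set.ofList ["llm"]) then "llm"
     else if PySem.Set.equal sources (PySem.Set.ofList ["template"]) then "template"
     else "mixed")
    = (let st := vs.foldl pvStepB (none, false)
       match st.1 with
       | none => "unknown"
       | some f => if st.2 || !(f = "heuristic" ∨ f = "llm" ∨ f = "template") then "mixed" else f) := by
  cases vs with
  | nil => rfl
  | cons x xs =>
      have hx : x ≠ "not_found" := hvs x (by simp)
      have hstep : pvStepB (none, false) x = (some x, false) := by simp [pvStepB, hx]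
      have hfold : (x :: xs).foldl pvStepB (none, false)
          = (some x, xs.any (fun s => s ≠ "not_found" && s ≠ x)) := by
        rw [List.foldl_cons, hstep, foldB_from_some]
        simp
      by_cases hall : ∀ y ∈ xs, y = x
      · have hany : xs.any (fun s => s ≠ "not_found" && s ≠ x) = false := by
          simp only [List.any_eq_false]
          intro s hs
          simp [hall s hs]
        have hset : PySem.Set.ofList (x :: xs) = [x] := ofList_all_eq x xs hall
        have hsing : ∀ c : String, PySem.Set.ofList [c] = [c] := fun c => rfl
        rw [hfold, hany, hset, hsing, hsing, hsing]
        simp only [set_equal_singleton]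
        by_cases h1 : x = "heuristic"
        · simp [h1]
        · by_cases h2 : x = "llm"
          · simp [h2]
          · by_cases h3 : x = "template"
            · simp [h3]
            · simp [h1, h2, h3]
      · push Not at hall
        obtain ⟨y, hy, hyx⟩ := hall
        have hyn : y ≠ "not_found" := hvs y (by simp [hy])
        have hany : xs.any (fun s => s ≠ "not_found" && s ≠ x) = true := by
          simp only [List.any_eq_true]
          exact ⟨y, hy, by simp [hyn, hyx]⟩
        have hne : PySem.Set.ofList (x :: xs) ≠ [] := by
          rw [PySem.Set.ofList_cons]; simp
        have hxm : x ∈ PySem.Set.ofList (x :: xs) := by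
          rw [PySem.Set.mem_ofList]; simp
        have hym : y ∈ PySem.Set.ofList (x :: xs) := by
          rw [PySem.Set.mem_ofList]; simp [hy]
        have hsing : ∀ c : String, PySem.Set.ofList [c] = [c] := fun c => rfl
        rw [hfold]
        simp only [hne, if_false, hsing, hany,
          set_equal_false_of_two _ x y _ hxm hym (fun h => hyx h.symm)]
        rfl

lemma core (vals : List String) :
    (let sources := PySem.Set.ofList (vals.filter (fun source => source ≠ "not_found"))
     if sources = [] then "unknown"
     else if PySem.Set.equal sources (PySem.Set.ofList ["heuristic"]) then "heuristic"
     else if PySem.Set.equal sources (PySem.Set.ofList ["llm"]) then "llm"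
     else if PySem.Set.equal sources (PySem.Set.ofList ["template"]) then "template"
     else "mixed")
    = (let st := vals.foldl pvStepB (none, false)
       match st.1 with
       | none => "unknown"
       | some f => if st.2 || !(f = "heuristic" ∨ f = "llm" ∨ f = "template") then "mixed" else f) := by
  rw [foldB_filter]
  exact core' _ (fun s hs => by simpa using (List.of_mem_filter hs))

-- ===== VERDICT (by name: the statement is the Claim_ definition above) =====
theorem resolve_metadata_source_py_spec : Claim_equal_resolve_metadata_source_py := by
  intro fs _
  unfold Spec_resolve_metadata_source_py resolve_metadata_source_py resolve_metadata_source_py_alt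
  exact core _
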